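-- pv_equiv track=rewrite | github.com/kirillermolov/ChatBot | utils.py | generate_batches_no_memory
-- ===== SOURCE A (Python) =====
-- def generate_batches_no_memory(input_samples,output_samples,get_movie_lines,batch_size=64):
--     X,Y = [],[]
--     for i, (x,y) in enumerate(zip(input_samples,output_samples), 1):
--         X.append(get_movie_lines[x])
--         Y.append(get_movie_lines[y])
--         if i % batch_size == 0:
--             yield X,Y
--             X,Y= [],[]
--     if X and Y:
--         yield X,Y
-- ===== SOURCE B (Python) =====
-- def generate_batches_no_memory(input_samples, output_samples, get_movie_lines, batch_size=64):
--     pairs = [(get_movie_lines[x], get_movie_lines[y])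
--              for x, y in zip(input_samples, output_samples)]
--     for i in range(0, len(pairs), batch_size):
--         chunk = pairs[i:i + batch_size]
--         yield [a for a, _ in chunk], [b for _, b in chunk]
-- ===== Notes on version B (the rewrite author's own statement) =====
-- stated objective: alternative
-- what changed: Replaces A's streaming enumerate loop that accumulates X/Y and flushes on i % batch_size == 0 by materialising the looked-up pairs once and slicing them into chunks over range(0, len, batch_size); Pre_ excludes missing keys and batch_size = 0 (where one of the programs raises) and negative batch_size on nonempty input, an unspecifiable corner where A's modulo test happens to chunk by |batch_size| while B's stepped range yields no batches.
-- outside the precondition, e.g. on generate_batches_no_memory(['a'], ['b'], {'a': 'x', 'b': 'y'}, -1): A returns [(['x'], ['y'])], B returns []; on generate_batches_no_memory([], [], {}, 0): A returns [], B raises ValueError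
import Mathlib
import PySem

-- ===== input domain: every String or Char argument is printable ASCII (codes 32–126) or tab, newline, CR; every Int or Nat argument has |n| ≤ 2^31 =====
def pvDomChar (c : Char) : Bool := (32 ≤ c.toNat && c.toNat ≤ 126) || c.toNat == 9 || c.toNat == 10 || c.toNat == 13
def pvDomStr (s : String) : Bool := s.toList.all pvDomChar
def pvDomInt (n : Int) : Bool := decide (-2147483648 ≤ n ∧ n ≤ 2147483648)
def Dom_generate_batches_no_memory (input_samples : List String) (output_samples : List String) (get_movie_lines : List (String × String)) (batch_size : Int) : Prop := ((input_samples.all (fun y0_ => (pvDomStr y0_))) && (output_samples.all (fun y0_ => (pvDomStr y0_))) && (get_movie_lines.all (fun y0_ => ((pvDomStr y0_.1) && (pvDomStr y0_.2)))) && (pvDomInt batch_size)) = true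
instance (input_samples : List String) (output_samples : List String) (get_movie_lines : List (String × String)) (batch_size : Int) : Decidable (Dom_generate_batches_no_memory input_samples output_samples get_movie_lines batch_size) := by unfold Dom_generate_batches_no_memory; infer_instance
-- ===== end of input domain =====

-- B replaces A's streaming accumulate-and-flush generator loop by materialising the looked-up
-- pairs once and slicing them into chunks over range(0, len, batch_size) (different decomposition, same cost).


-- ===== PORT A =====
-- dict lookup get_movie_lines[x]; total form with default "" — Pre_ requires the key to be present
def pvLookup (gml : List (String × String)) (x : String) : String := (gml.lookup x).getD ""

-- the body of A's for-loop: append the two looked-up lines, flush when i % batch_size == 0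
def pvBodyA (gml : List (String × String)) (bs : Int)
    (st : (List String × List String) × List (List String × List String))
    (p : Int × (String × String)) : (List String × List String) × List (List String × List String) :=
  let X := st.1.1 ++ [pvLookup gml p.2.1]
  let Y := st.1.2 ++ [pvLookup gml p.2.2]
  if PySem.Int.mod p.1 bs = 0 then (([], []), st.2 ++ [(X, Y)]) else ((X, Y), st.2)

def generate_batches_no_memory (input_samples : List String) (output_samples : List String) (get_movie_lines : List (String × String)) (batch_size : Int) : List (List String × List String) :=
  let st := (PySem.List.enumerate (input_samples.zip output_samples) 1).foldl
              (pvBodyA get_movie_lines batch_size) (([], []), [])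
  -- trailing `if X and Y: yield X,Y`
  if ¬ st.1.1.isEmpty ∧ ¬ st.1.2.isEmpty then st.2 ++ [st.1] else st.2

-- ===== PORT B =====
def generate_batches_no_memory_alt (input_samples : List String) (output_samples : List String) (get_movie_lines : List (String × String)) (batch_size : Int) : List (List String × List String) :=
  let pairs := (input_samples.zip output_samples).map
    (fun p => (pvLookup get_movie_lines p.1, pvLookup get_movie_lines p.2))
  (PySem.List.pyRange 0 pairs.length batch_size).map (fun i =>
    let chunk := PySem.List.slice pairs (some i) (some (i + batch_size))
    (chunk.map (·.1), chunk.map (·.2)))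

-- ===== PRECONDITION & SPEC =====
-- Pre_ excludes inputs where one of the programs raises — a missing dict key for a consumed sample
-- (KeyError in A and B) and batch_size = 0 (ZeroDivisionError in A on nonempty input, ValueError from
-- range() in B even on empty input) — and negative batch_size with nonempty samples, an unspecifiable
-- corner where A's modulo test happens to chunk by |batch_size| while B's stepped range yields no batches.
def Pre_generate_batches_no_memory (input_samples : List String) (output_samples : List String) (get_movie_lines : List (String × String)) (batch_size : Int) : Prop :=
  (∀ p ∈ input_samples.zip output_samples,
      (get_movie_lines.lookup p.1).isSome ∧ (get_movie_lines.lookup p.2).isSome) ∧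
  (0 < batch_size ∨ (input_samples.zip output_samples = [] ∧ batch_size ≠ 0))
instance (input_samples : List String) (output_samples : List String) (get_movie_lines : List (String × String)) (batch_size : Int) : Decidable (Pre_generate_batches_no_memory input_samples output_samples get_movie_lines batch_size) := by unfold Pre_generate_batches_no_memory; infer_instance

def pvWitness_generate_batches_no_memory : List String × List String × (List (String × String)) × Int :=
  (["a", "b", "a"], ["b", "a", "b"], [("a", "hi"), ("b", "yo")], 2)

def Spec_generate_batches_no_memory (input_samples : List String) (output_samples : List String) (get_movie_lines : List (String × String)) (batch_size : Int) (out : List (List String × List String)) : Prop := out = generate_batches_no_memory_alt input_samples output_samples get_movie_lines batch_size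
instance (input_samples : List String) (output_samples : List String) (get_movie_lines : List (String × String)) (batch_size : Int) (out : List (List String × List String)) : Decidable (Spec_generate_batches_no_memory input_samples output_samples get_movie_lines batch_size out) := by unfold Spec_generate_batches_no_memory; infer_instance

-- ===== CLAIM (what is proved, stated in full; the proofs are below) =====
def Claim_equal_generate_batches_no_memory : Prop := ∀ (input_samples : List String) (output_samples : List String) (get_movie_lines : List (String × String)) (batch_size : Int), Dom_generate_batches_no_memory input_samples output_samples get_movie_lines batch_size → Pre_generate_batches_no_memory input_samples output_samples get_movie_lines batch_size → Spec_generate_batches_no_memory input_samples output_samples get_movie_lines batch_size (generate_batches_no_memory input_samples output_samples get_movie_lines batch_size)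

-- ===== LEMMAS AND PROOFS =====

-- chunking into pieces of size k+1 (the common characterisation both ports are reduced to)
def pvChunk (k : Nat) : List α → List (List α)
  | [] => []
  | x :: xs => ((x :: xs).take (k + 1)) :: pvChunk k ((x :: xs).drop (k + 1))
termination_by L => L.length
decreasing_by simp

lemma pvChunk_nil (k : Nat) : pvChunk k ([] : List α) = [] := by unfold pvChunk; rfl

lemma pvChunk_cons (k : Nat) (L : List α) (h : L ≠ []) :
    pvChunk k L = L.take (k + 1) :: pvChunk k (L.drop (k + 1)) := by
  cases L with
  | nil => exact absurd rfl h
  | cons x xs => conv_lhs => unfold pvChunk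

lemma pvChunk_of_len (k : Nat) (P M : List α) (hP : P.length = k + 1) :
    pvChunk k (P ++ M) = P :: pvChunk k M := by
  have hne : P ++ M ≠ [] := by cases P <;> simp_all
  rw [pvChunk_cons k _ hne, List.take_append_of_le_length (by omega),
    List.drop_append_of_le_length (by omega), List.take_of_length_le (by omega),
    List.drop_eq_nil_of_le (by omega), List.nil_append]

lemma pvChunk_short (k : Nat) (P : List α) (hP : P.length ≤ k + 1) (h : P ≠ []) :
    pvChunk k P = [P] := by
  rw [pvChunk_cons k P h, List.take_of_length_le hP, List.drop_eq_nil_of_le hP, pvChunk_nil]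

def pvSplit (c : List (String × String)) : List String × List String := (c.map (·.1), c.map (·.2))

-- A-side invariant: running the loop from a partially filled chunk P at global position c
-- (c ≡ |P| mod |bs|) and then flushing the leftovers yields out0 ++ the chunks of P ++ mapped M.
lemma foldA_inv (gml : List (String × String)) (bs : Int) (hbs : bs ≠ 0)
    (M : List (String × String)) :
    ∀ (P : List (String × String)) (out0 : List (List String × List String)) (c : Nat),
    P.length < bs.natAbs → c % bs.natAbs = P.length →
    (let st := (PySem.List.enumerate M ((c : Int) + 1)).foldl (pvBodyA gml bs)
                ((P.map (·.1), P.map (·.2)), out0)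
     if ¬ st.1.1.isEmpty ∧ ¬ st.1.2.isEmpty then st.2 ++ [st.1] else st.2)
    = out0 ++ (pvChunk (bs.natAbs - 1)
        (P ++ M.map (fun p => (pvLookup gml p.1, pvLookup gml p.2)))).map pvSplit := by
  induction M with
  | nil =>
    intro P out0 c hP hc
    simp only [PySem.List.enumerate_nil, List.foldl_nil, List.map_nil, List.append_nil]
    by_cases h : P = []
    · subst h; simp [pvChunk_nil]
    · rw [pvChunk_short _ _ (by omega) h]
      simp [h, pvSplit, List.isEmpty_iff]
  | cons m M ih =>
    intro P out0 c hP hc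
    have hk : 0 < bs.natAbs := Int.natAbs_pos.mpr hbs
    rw [PySem.List.enumerate_cons]
    simp only [List.foldl_cons]
    have hc1 : (c + 1) % bs.natAbs = (P.length + 1) % bs.natAbs := by
      conv_lhs => rw [Nat.add_mod, hc]
      conv_rhs => rw [Nat.add_mod, Nat.mod_eq_of_lt hP]
    have hmod : (PySem.Int.mod ((c : Int) + 1) bs = 0) ↔ (P.length + 1 = bs.natAbs) := by
      rw [PySem.Int.mod_eq_zero_iff_dvd, ← Int.natAbs_dvd,
        show ((c : Int) + 1) = ((c + 1 : Nat) : Int) by push_cast; ring,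
        Int.natCast_dvd_natCast, Nat.dvd_iff_mod_eq_zero, hc1]
      constructor
      · intro h0
        rcases Nat.lt_or_ge (P.length + 1) bs.natAbs with h | h
        · rw [Nat.mod_eq_of_lt h] at h0; omega
        · omega
      · intro h; rw [h, Nat.mod_self]
    set Fm := (pvLookup gml m.1, pvLookup gml m.2) with hFm
    have hx : P.map (·.1) ++ [pvLookup gml m.1] = (P ++ [Fm]).map (·.1) := by simp [hFm]
    have hy : P.map (·.2) ++ [pvLookup gml m.2] = (P ++ [Fm]).map (·.2) := by simp [hFm]
    have hcast : ((c : Int) + 1 + 1) = (((c + 1 : Nat) : Int) + 1) := by push_cast; ring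
    by_cases hflush : PySem.Int.mod ((c : Int) + 1) bs = 0
    · simp only [pvBodyA, hflush, if_pos, hx, hy, hcast]
      have := ih [] (out0 ++ [((P ++ [Fm]).map (·.1), (P ++ [Fm]).map (·.2))]) (c + 1) hk
        (by rw [hc1, hmod.mp hflush, Nat.mod_self]; rfl)
      simp only [List.map_nil, List.nil_append] at this
      rw [this,
        show P ++ (m :: M).map (fun p => (pvLookup gml p.1, pvLookup gml p.2))
            = (P ++ [Fm]) ++ M.map (fun p => (pvLookup gml p.1, pvLookup gml p.2)) by simp [hFm],
        pvChunk_of_len _ _ _ (by simp; omega)]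
      simp [pvSplit]
    · have hlt : P.length + 1 < bs.natAbs := by
        have := (not_iff_not.mpr hmod).mp hflush; omega
      simp only [pvBodyA, hflush, if_false, hx, hy, hcast]
      have := ih (P ++ [Fm]) out0 (c + 1) (by simpa using hlt)
        (by rw [hc1, Nat.mod_eq_of_lt hlt]; simp)
      rw [this]
      simp [hFm]

-- pyRange with a positive step peels its first element
lemma pyRange_pos_cons (a b s : Int) (hs : 0 < s) (h : a < b) :
    PySem.List.pyRange a b s = a :: PySem.List.pyRange (a + s) b s := by
  rw [PySem.List.pyRange_of_pos a b hs, PySem.List.pyRange_of_pos (a + s) b hs]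
  have key : ((b - a + s - 1) / s).toNat
      = (if a + s < b then ((b - (a + s) + s - 1) / s).toNat else 0) + 1 := by
    have h2 : (b - a + s - 1) / s = (b - a - 1) / s + 1 := by
      rw [show b - a + s - 1 = (b - a - 1) + 1 * s by ring,
        Int.add_mul_ediv_right _ _ (by omega)]
    by_cases hab : a + s < b
    · rw [if_pos hab, h2, show b - (a + s) + s - 1 = b - a - 1 by ring]
      have : 0 ≤ (b - a - 1) / s := Int.ediv_nonneg (by omega) (by omega)
      omega
    · rw [if_neg hab, h2]
      have : (b - a - 1) / s = 0 := Int.ediv_eq_zero_of_lt (by omega) (by omega)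
      omega
  rw [if_pos h, key, List.range_succ_eq_map, List.map_cons, List.map_map]
  congr 1
  · simp
  · apply List.map_congr_left; intro x _; simp [Function.comp]; ring

-- an empty range is empty for every step
lemma pyRange_self (a s : Int) : PySem.List.pyRange a a s = [] := by
  simp only [PySem.List.pyRange]
  split_ifs <;> simp_all

-- B-side: mapping slices over the stepped index range IS chunking the suffix
lemma sliceB {γ : Type} (k : Nat) (hk : 0 < k) (L : List γ) (a : Nat) :
    (PySem.List.pyRange (a : Int) (L.length : Int) (k : Int)).map
        (fun i => PySem.List.slice L (some i) (some (i + (k : Int))))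
    = pvChunk (k - 1) (L.drop a) := by
  by_cases hab : a < L.length
  · rw [pyRange_pos_cons _ _ _ (by exact_mod_cast hk) (by exact_mod_cast hab)]
    rw [List.map_cons, PySem.List.slice_natCast_add L a k]
    rw [pvChunk_cons (k - 1) (L.drop a) (by simp [List.drop_eq_nil_iff]; omega)]
    rw [Nat.sub_add_cancel hk, List.drop_drop]
    rw [show (a : Int) + (k : Int) = ((a + k : Nat) : Int) by push_cast; ring]
    rw [sliceB k hk L (a + k)]
  · rw [PySem.List.pyRange_of_pos _ _ (by exact_mod_cast hk : (0:Int) < (k : Int)),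
      if_neg (by exact_mod_cast hab), List.drop_eq_nil_of_le (by omega)]
    simp [pvChunk_nil]
termination_by L.length - a
decreasing_by omega

-- ===== VERDICT (by name: the statement is the Claim_ definition above) =====
theorem generate_batches_no_memory_spec : Claim_equal_generate_batches_no_memory := by
  intro ins outs gml bs _hdom hpre
  obtain ⟨_hkeys, hz⟩ := hpre
  unfold Spec_generate_batches_no_memory
  by_cases hz0 : ins.zip outs = []
  · simp [generate_batches_no_memory, generate_batches_no_memory_alt, hz0,
      PySem.List.enumerate_nil, pyRange_self]
  · have hpos : 0 < bs := by
      rcases hz with h | ⟨h, _⟩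
      · exact h
      · exact absurd h hz0
    have hbs : bs ≠ 0 := ne_of_gt hpos
    have hk : 0 < bs.natAbs := Int.natAbs_pos.mpr hbs
    have hcast : (bs.natAbs : Int) = bs := Int.natAbs_of_nonneg (le_of_lt hpos)
    set L := (ins.zip outs).map (fun p => (pvLookup gml p.1, pvLookup gml p.2)) with hL
    have hA := foldA_inv gml bs hbs (ins.zip outs) [] [] 0 (by simpa using hk) (by simp)
    simp only [List.map_nil, List.nil_append, Nat.cast_zero, zero_add] at hA
    have hB := sliceB bs.natAbs hk L 0
    simp only [Nat.cast_zero, List.drop_zero, hcast] at hB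
    unfold generate_batches_no_memory generate_batches_no_memory_alt
    rw [hA]
    simp only [← hL]
    rw [show (fun i => ((PySem.List.slice L (some i) (some (i + bs))).map (·.1),
          (PySem.List.slice L (some i) (some (i + bs))).map (·.2)))
        = (pvSplit ∘ fun i => PySem.List.slice L (some i) (some (i + bs))) from rfl,
      ← List.map_map, hB]
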